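-- pv_equiv track=rewrite | github.com/C-Hauschildt-S/Epithets-of-Hector | test2.py | agree_cng
-- ===== SOURCE A (Python) =====
-- from typing import Dict, List, Tuple
--
-- def agree_cng(m1: Dict[str, str], m2: Dict[str, str]) -> bool:
--     """Check case/number/gender agreement - RELAXED version."""
--     if not m1 or not m2:
--         return False
--
--     # Count matching features
--     matches = 0
--     total = 0
--
--     for feature in ['case', 'number', 'gender']:
--         val1 = m1.get(feature)
--         val2 = m2.get(feature)
--
--         if val1 and val2:
--             total += 1
--             if val1 == val2:
--                 matches += 1
--             else:
--                 # If they conflict, it's not agreement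
--                 return False
--
--     # Need at least 2 matching features, OR all features present match
--     return matches >= 2 or (total > 0 and matches == total)
-- ===== SOURCE B (Python) =====
-- FEATURES = ('case', 'number', 'gender')
--
-- def agree_cng(m1, m2):
--     """Check case/number/gender agreement - RELAXED version (set formulation)."""
--     if not m1 or not m2:
--         return False
--     d1 = {f: v for f in FEATURES if (v := m1.get(f))}
--     d2 = {f: v for f in FEATURES if (v := m2.get(f))}
--     common = d1.keys() & d2.keys()
--     same = d1.items() & d2.items()
--     return len(common) > 0 and len(common) == len(same)
-- ===== Notes on version B (the rewrite author's own statement) =====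
-- stated objective: alternative
-- what changed: Instead of looping over the features with matches/total counters and an early-return on conflict, B restricts each dict to its truthy features and decides agreement by set algebra: the key-set intersection and item-set intersection of the two restrictions must be nonempty and equal in size.
import Mathlib
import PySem

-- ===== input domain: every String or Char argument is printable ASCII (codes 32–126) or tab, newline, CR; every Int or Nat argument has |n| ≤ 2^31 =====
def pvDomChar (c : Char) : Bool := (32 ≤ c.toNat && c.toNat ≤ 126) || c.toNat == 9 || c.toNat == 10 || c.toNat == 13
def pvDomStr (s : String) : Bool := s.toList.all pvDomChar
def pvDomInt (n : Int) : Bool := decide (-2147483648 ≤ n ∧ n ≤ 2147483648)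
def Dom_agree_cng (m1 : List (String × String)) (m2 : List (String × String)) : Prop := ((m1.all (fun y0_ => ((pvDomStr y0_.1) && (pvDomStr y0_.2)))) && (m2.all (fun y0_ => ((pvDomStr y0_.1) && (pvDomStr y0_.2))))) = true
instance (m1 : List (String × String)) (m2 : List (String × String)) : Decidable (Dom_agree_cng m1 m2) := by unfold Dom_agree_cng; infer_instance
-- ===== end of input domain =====

-- B replaces A's feature loop with its two running counters by a set-based formulation:
-- restrict both dicts to the truthy features, then agree iff the key-set and item-set
-- intersections are nonempty and of equal size (objective: alternative).

-- first-match association-list lookup = Python dict.get (dicts have unique keys; first match is exact)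
def pyGetS (m : List (String × String)) (k : String) : Option String :=
  match m with
  | [] => none
  | (k', v) :: rest => if k' == k then some v else pyGetS rest k

-- ===== PORT A =====
def agreeLoopA (m1 m2 : List (String × String)) (fs : List String)
    (mcount total : Int) : Bool :=
  match fs with
  | [] => mcount ≥ 2 || (total > 0 && mcount == total)
  | f :: rest =>
    match pyGetS m1 f, pyGetS m2 f with
    | some v1, some v2 =>
      if v1 ≠ "" && v2 ≠ "" then
        if v1 == v2 then agreeLoopA m1 m2 rest (mcount + 1) (total + 1)
        else false
      else agreeLoopA m1 m2 rest mcount total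
    | _, _ => agreeLoopA m1 m2 rest mcount total

def agree_cng (m1 : List (String × String)) (m2 : List (String × String)) : Bool :=
  if m1.isEmpty || m2.isEmpty then false
  else agreeLoopA m1 m2 ["case", "number", "gender"] 0 0

-- ===== PORT B =====
-- {f: v for f in FEATURES if (v := m.get(f))} : restriction of m to the truthy features
def trimB (m : List (String × String)) : List (String × String) :=
  ["case", "number", "gender"].filterMap (fun f =>
    match pyGetS m f with
    | some v => if v ≠ "" then some (f, v) else none
    | none => none)

-- d1.keys() & d2.keys() and d1.items() & d2.items(): only the SIZES of these set
-- intersections are used, and trimB's key lists are duplicate-free (distinct feature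
-- literals), so the sizes are computed exactly as lengths of list filters.
def agree_cng_alt (m1 : List (String × String)) (m2 : List (String × String)) : Bool :=
  if m1.isEmpty || m2.isEmpty then false
  else
    let d1 := trimB m1
    let d2 := trimB m2
    let common := d1.filter (fun p => (d2.map Prod.fst).contains p.1)
    let same := d1.filter (fun p => d2.contains p)
    decide (0 < common.length) && common.length == same.length

-- ===== PRECONDITION & SPEC =====
def Spec_agree_cng (m1 : List (String × String)) (m2 : List (String × String)) (out : Bool) : Prop := out = agree_cng_alt m1 m2
instance (m1 : List (String × String)) (m2 : List (String × String)) (out : Bool) : Decidable (Spec_agree_cng m1 m2 out) := by unfold Spec_agree_cng; infer_instance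

-- ===== CLAIM (what is proved, stated in full; the proofs are below) =====
def Claim_equal_agree_cng : Prop := ∀ (m1 : List (String × String)) (m2 : List (String × String)), Dom_agree_cng m1 m2 → Spec_agree_cng m1 m2 (agree_cng m1 m2)

-- ===== LEMMAS AND PROOFS =====

-- the (v1, v2) pairs of the features truthy in both dicts, in feature order
def pairsAB (m1 m2 : List (String × String)) (fs : List String) : List (String × String) :=
  fs.filterMap (fun f =>
    match pyGetS m1 f, pyGetS m2 f with
    | some v1, some v2 => if v1 ≠ "" && v2 ≠ "" then some (v1, v2) else none
    | _, _ => none)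

-- A's loop over any remaining feature list, started at mcount = total = t, equals
-- "no conflicting pair and (t > 0 or some pair present)" over the same suffix.
theorem agreeLoopA_eq (m1 m2 : List (String × String)) (fs : List String) (t : Int)
    (ht : 0 ≤ t) :
    agreeLoopA m1 m2 fs t t =
      (if (pairsAB m1 m2 fs).any (fun p => p.1 ≠ p.2) then false
       else decide (0 < t) || !(pairsAB m1 m2 fs).isEmpty) := by
  induction fs generalizing t with
  | nil =>
    simp only [agreeLoopA, pairsAB, List.filterMap_nil, List.any_nil, List.isEmpty_nil]
    by_cases h2 : (2:Int) ≤ t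
    · simp [h2]; omega
    · by_cases h0 : (0:Int) < t
      · simp [h0, h2]
      · simp [h0]; omega
  | cons f rest ih =>
    simp only [agreeLoopA, pairsAB] at *
    cases hv1 : pyGetS m1 f with
    | none => simpa [List.filterMap_cons, hv1] using ih t ht
    | some v1 =>
      cases hv2 : pyGetS m2 f with
      | none => simpa [List.filterMap_cons, hv1, hv2] using ih t ht
      | some v2 =>
        by_cases htr : (v1 ≠ "" && v2 ≠ "") = true
        · obtain ⟨hne1, hne2⟩ : v1 ≠ "" ∧ v2 ≠ "" := by simpa using htr
          by_cases heq : v1 = v2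
          · subst heq
            have := ih (t + 1) (by omega)
            simp only [List.filterMap_cons, hv1, hv2] at this ⊢
            simp [this, hne1, show (0:Int) < t + 1 by omega]
          · simp [hv1, hv2, hne1, hne2, heq]
        · have : ¬(v1 ≠ "" ∧ v2 ≠ "") := by simpa using htr
          simpa [List.filterMap_cons, hv1, hv2, this] using ih t ht

-- membership characterisation of the trimmed dict
theorem mem_trimB (m : List (String × String)) (p : String × String) :
    p ∈ trimB m ↔ (p.1 ∈ (["case", "number", "gender"] : List String)) ∧
      pyGetS m p.1 = some p.2 ∧ p.2 ≠ "" := by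
  simp only [trimB, List.mem_filterMap]
  constructor
  · rintro ⟨f, hf, hm⟩
    cases hp : pyGetS m f with
    | none => rw [hp] at hm; simp at hm
    | some v =>
      rw [hp] at hm
      by_cases hv : v = ""
      · simp [hv] at hm
      · simp only [hv, ne_eq, not_false_iff, if_true] at hm
        obtain rfl : (f, v) = p := by simpa using hm
        exact ⟨hf, hp, hv⟩
  · rintro ⟨hf, hm, hv⟩
    exact ⟨p.1, hf, by rw [hm]; simp [hv]⟩

-- two filterMaps over the same list have equal lengths if the options agree on isSome
theorem length_filterMap_congr {α β γ : Type} (fs : List α) (f : α → Option β) (g : α → Option γ)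
    (h : ∀ a ∈ fs, (f a).isSome = (g a).isSome) :
    (fs.filterMap f).length = (fs.filterMap g).length := by
  induction fs with
  | nil => rfl
  | cons a rest ih =>
    have ha := h a (List.mem_cons_self ..)
    have ih' := ih (fun x hx => h x (List.mem_cons_of_mem _ hx))
    cases hf : f a <;> cases hg : g a <;> simp_all

-- B's key-set intersection size = number of pairs
theorem common_len (m1 m2 : List (String × String)) :
    ((trimB m1).filter (fun p => ((trimB m2).map Prod.fst).contains p.1)).length =
      (pairsAB m1 m2 ["case", "number", "gender"]).length := by
  have hcong : (trimB m1).filter (fun p => ((trimB m2).map Prod.fst).contains p.1) =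
      (trimB m1).filter (fun p => (pyGetS m2 p.1).any (fun v => v ≠ "")) := by
    apply List.filter_congr
    intro p hp
    obtain ⟨hf, _, _⟩ := (mem_trimB m1 p).1 hp
    rw [List.contains_eq_mem]
    cases hp2 : pyGetS m2 p.1 with
    | none =>
      have hno : ¬ ∃ q ∈ trimB m2, q.1 = p.1 := by
        rintro ⟨q, hq, hq1⟩
        obtain ⟨_, hq2, _⟩ := (mem_trimB m2 q).1 hq
        rw [hq1, hp2] at hq2; simp at hq2
      simp [List.mem_map, hno]
    | some v =>
      by_cases hv : v = ""
      · subst hv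
        have hno : ¬ ∃ q ∈ trimB m2, q.1 = p.1 := by
          rintro ⟨q, hq, hq1⟩
          obtain ⟨_, hq2, hq3⟩ := (mem_trimB m2 q).1 hq
          rw [hq1, hp2] at hq2
          exact hq3 (by simpa using hq2)
        simp [List.mem_map, hno]
      · have : (p.1, v) ∈ trimB m2 := (mem_trimB m2 (p.1, v)).2 ⟨hf, hp2, hv⟩
        have hmem : p.1 ∈ (trimB m2).map Prod.fst := List.mem_map.2 ⟨(p.1, v), this, rfl⟩
        simp [hmem, hv]
  rw [hcong, trimB, pairsAB, List.filter_filterMap]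
  apply length_filterMap_congr
  intro f _
  cases h1 : pyGetS m1 f <;> cases h2 : pyGetS m2 f <;>
    simp [Option.filter, h2] <;> split_ifs <;> simp_all

-- B's item-set intersection size = number of agreeing pairs
theorem same_len (m1 m2 : List (String × String)) :
    ((trimB m1).filter (fun p => (trimB m2).contains p)).length =
      ((pairsAB m1 m2 ["case", "number", "gender"]).filter (fun p => p.1 == p.2)).length := by
  have hcong : (trimB m1).filter (fun p => (trimB m2).contains p) =
      (trimB m1).filter (fun p => pyGetS m2 p.1 == some p.2) := by
    apply List.filter_congr
    intro p hp
    obtain ⟨hf, _, hv⟩ := (mem_trimB m1 p).1 hp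
    rw [List.contains_eq_mem]
    by_cases hmem : pyGetS m2 p.1 = some p.2
    · have : p ∈ trimB m2 := (mem_trimB m2 p).2 ⟨hf, hmem, hv⟩
      simp [this, hmem]
    · have : p ∉ trimB m2 := fun h => hmem ((mem_trimB m2 p).1 h).2.1
      simp [this, hmem]
  rw [hcong, trimB, pairsAB, List.filter_filterMap, List.filter_filterMap]
  apply length_filterMap_congr
  intro f _
  rcases h1 : pyGetS m1 f with _ | v1 <;> rcases h2 : pyGetS m2 f with _ | v2
  · simp [Option.filter]
  · simp [Option.filter]
  · by_cases hv1 : v1 = "" <;> simp [Option.filter, h2, hv1]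
  · by_cases he : v1 = v2
    · subst he
      by_cases hv1 : v1 = "" <;> simp [Option.filter, h2, hv1]
    · have he' : ¬ v2 = v1 := fun h => he h.symm
      by_cases hv1 : v1 = "" <;> by_cases hv2 : v2 = "" <;>
        simp [Option.filter, h2, hv1, hv2, he, he']

-- generic step: "no conflicting pair and some pair" = "positive count and all pairs agree"
theorem pairs_count_eq (pr : List (String × String)) :
    (if pr.any (fun p => p.1 ≠ p.2) then false else !pr.isEmpty) =
      (decide (0 < pr.length) && pr.length == (pr.filter (fun p => p.1 == p.2)).length) := by
  by_cases h : pr.any (fun p => decide (p.1 ≠ p.2)) = true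
  · obtain ⟨p, hp, hne⟩ := List.any_eq_true.1 h
    have hlt : (pr.filter (fun p => p.1 == p.2)).length < pr.length := by
      apply List.length_filter_lt_length_iff_exists.2
      exact ⟨p, hp, by simpa using hne⟩
    have hbe : (pr.length == (pr.filter (fun p => p.1 == p.2)).length) = false := by
      simp; omega
    simp [h, hbe]
    intro hall
    exact absurd (hall p.1 p.2 (by simpa using hp)) (by simpa using hne)
  · have hall : ∀ p ∈ pr, (p.1 == p.2) = true := by
      intro p hp
      by_contra hne
      exact h (List.any_eq_true.2 ⟨p, hp, by simpa using hne⟩)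
    have hfe : pr.filter (fun p => p.1 == p.2) = pr := List.filter_eq_self.2 hall
    simp only [h, if_neg, hfe, beq_self_eq_true, Bool.and_true, Bool.if_false_right]
    cases pr <;> simp

-- ===== VERDICT (by name: the statement is the Claim_ definition above) =====
theorem agree_cng_spec : Claim_equal_agree_cng := by
  intro m1 m2 _
  unfold Spec_agree_cng agree_cng agree_cng_alt
  by_cases h : (m1.isEmpty || m2.isEmpty) = true
  · simp [h]
  · simp only [h, Bool.false_eq_true, if_false]
    rw [agreeLoopA_eq m1 m2 _ 0 le_rfl, common_len, same_len]
    simpa using pairs_count_eq (pairsAB m1 m2 ["case", "number", "gender"])
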